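-- pv_equiv track=rewrite | github.com/stde/TeX-Condensator | code/steffen.py | morphology
-- ===== SOURCE A (Python) =====
-- def morphology(dict,stems):
--     stemvalues = {}
--
--     for word in dict:
--         if stems[word] in stemvalues:
--             stemvalues[stems[word]] = stemvalues[stems[word]] + dict[word]
--         else:
--             stemvalues[stems[word]] = dict[word]
--     for word in dict:
--         dict[word] = stemvalues[stems[word]]
--     return dict
-- ===== SOURCE B (Python) =====
-- def morphology(dict, stems):
--     # For every word, its new value is the sum over all words sharing its stem,
--     # computed by a direct pairwise scan (no per-stem accumulator at all);
--     # the snapshot comprehension finishes before the in-place update starts.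
--     new = {w: sum(v for u, v in dict.items() if stems[u] == stems[w]) for w in dict}
--     dict.update(new)
--     return dict
-- ===== Notes on version B (the rewrite author's own statement) =====
-- stated objective: alternative
-- what changed: B has no per-stem accumulator at all: each word's new value is computed by a direct pairwise scan summing the values of all words with an equal stem (a snapshot dict comprehension), then written back in one update; A instead builds a stem->sum dict in a first pass and rewrites values from it in a second. Both mutate the argument dict in place identically.
import Mathlib
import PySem

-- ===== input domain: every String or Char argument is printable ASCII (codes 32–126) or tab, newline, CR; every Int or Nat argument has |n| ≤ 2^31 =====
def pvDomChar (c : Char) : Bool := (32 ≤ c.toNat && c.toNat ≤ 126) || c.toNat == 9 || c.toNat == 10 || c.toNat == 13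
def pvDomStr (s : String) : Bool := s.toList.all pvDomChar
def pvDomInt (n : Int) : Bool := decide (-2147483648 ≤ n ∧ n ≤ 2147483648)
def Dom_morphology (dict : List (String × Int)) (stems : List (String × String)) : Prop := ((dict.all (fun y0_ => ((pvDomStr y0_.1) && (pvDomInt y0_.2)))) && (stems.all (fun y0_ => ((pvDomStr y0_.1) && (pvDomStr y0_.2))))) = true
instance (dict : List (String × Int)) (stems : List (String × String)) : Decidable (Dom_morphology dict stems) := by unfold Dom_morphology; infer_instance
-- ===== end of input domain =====

-- B drops A's per-stem accumulator: each word's new value is computed by a direct pairwise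
-- scan over a snapshot of the dict (sum the values of words with an equal stem), then written
-- back in one update (objective: alternative, O(n^2) vs A's O(n); both mutate the argument
-- dict in place identically, and the equivalence proved is about the returned list).


-- ===== PORT A =====
-- Literal port of A: first loop accumulates per-stem sums into `stemvalues`
-- (branching on membership exactly as the Python does), second loop rewrites
-- every value of `dict` (keys unchanged, so iterating the original key list is
-- exact).  `stems[word]` / `dict[word]` are total lookups here because
-- Pre_morphology excludes the KeyError inputs.
def morphology (dict : List (String × Int)) (stems : List (String × String)) : List (String × Int) :=
  let d : PySem.Dict String Int := PySem.Dict.mk dict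
  let st : PySem.Dict String String := PySem.Dict.mk stems
  let stemvalues : PySem.Dict String Int :=
    d.keys.foldl (fun sv word =>
      if sv.contains (st.getD word "") then
        sv.insert (st.getD word "") (sv.getD (st.getD word "") 0 + d.getD word 0)
      else
        sv.insert (st.getD word "") (d.getD word 0)) PySem.Dict.empty
  (d.keys.foldl (fun (cur : PySem.Dict String Int) word =>
      cur.insert word (stemvalues.getD (st.getD word "") 0)) d).items

-- ===== PORT B =====
-- Literal port of B: the comprehension over the dict snapshot — for each word w,
-- sum (·.2) over the items whose key has the same stem as w — then dict.update(new):
-- Python's update inserts each pair of `new` in order, ported as the foldl of insert.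
def morphology_alt (dict : List (String × Int)) (stems : List (String × String)) : List (String × Int) :=
  let d : PySem.Dict String Int := PySem.Dict.mk dict
  let st : PySem.Dict String String := PySem.Dict.mk stems
  let new : List (String × Int) :=
    d.keys.map (fun w =>
      (w, ((d.items.filter (fun p => st.getD p.1 "" == st.getD w "")).map (·.2)).sum))
  (new.foldl (fun (c : PySem.Dict String Int) p => c.insert p.1 p.2) d).items

-- ===== PRECONDITION & SPEC =====
-- Pre_ excludes (a) inputs where a word of `dict` is missing from `stems`, on which
-- the Python raises KeyError, and (b) association lists with duplicate keys, which do
-- not arise from a Python dict (a dict argument always has distinct keys).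
def Pre_morphology (dict : List (String × Int)) (stems : List (String × String)) : Prop :=
  (dict.map (·.1)).Nodup ∧ (stems.map (·.1)).Nodup ∧ ∀ p ∈ dict, p.1 ∈ stems.map (·.1)
instance (dict : List (String × Int)) (stems : List (String × String)) : Decidable (Pre_morphology dict stems) := by unfold Pre_morphology; infer_instance

def pvWitness_morphology : (List (String × Int)) × (List (String × String)) :=
  ([("runs", 2), ("ran", 3), ("cat", 5)], [("runs", "run"), ("ran", "run"), ("cat", "cat")])

def Spec_morphology (dict : List (String × Int)) (stems : List (String × String)) (out : List (String × Int)) : Prop := out = morphology_alt dict stems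
instance (dict : List (String × Int)) (stems : List (String × String)) (out : List (String × Int)) : Decidable (Spec_morphology dict stems out) := by unfold Spec_morphology; infer_instance

-- ===== CLAIM (what is proved, stated in full; the proofs are below) =====
def Claim_equal_morphology : Prop := ∀ (dict : List (String × Int)) (stems : List (String × String)), Dom_morphology dict stems → Pre_morphology dict stems → Spec_morphology dict stems (morphology dict stems)

-- ===== LEMMAS AND PROOFS =====

theorem pv_accum_getD (l : List String) (f : String → String) (g : String → Int)
    (sv0 : PySem.Dict String Int) (s : String) :
    (l.foldl (fun sv w =>
        if sv.contains (f w) then sv.insert (f w) (sv.getD (f w) 0 + g w)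
        else sv.insert (f w) (g w)) sv0).getD s 0
      = sv0.getD s 0 + ((l.filter (fun w => f w == s)).map g).sum := by
  induction l generalizing sv0 with
  | nil => simp
  | cons w l ih =>
    simp only [List.foldl_cons, List.filter_cons]
    by_cases hc : (sv0.contains (f w) : Bool)
    · simp only [hc, if_true]
      rw [ih]
      by_cases hs : f w == s
      · simp [(beq_iff_eq.mp hs).symm]
        ring
      · have hne : s ≠ f w := fun h => by simp [h] at hs
        simp [PySem.Dict.getD_insert, hne, hs]
    · simp only [Bool.not_eq_true] at hc
      simp only [hc, Bool.false_eq_true, if_false]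
      rw [ih]
      by_cases hs : f w == s
      · have h0 : sv0.getD s 0 = 0 := by
          rw [← beq_iff_eq.mp hs]; exact PySem.Dict.getD_of_not_contains sv0 0 hc
        have h0' : sv0.getD (f w) 0 = 0 := PySem.Dict.getD_of_not_contains sv0 0 hc
        simp [(beq_iff_eq.mp hs).symm, h0']
      · have hne : s ≠ f w := fun h => by simp [h] at hs
        simp [PySem.Dict.getD_insert, hne, hs]

-- On a Nodup dict, B's items-snapshot sum for word w equals the keys-filter sum h w.
theorem pv_sums_agree (D : PySem.Dict String Int) (f : String → String)
    (hnd : D.keys.Nodup) (w : String) :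
    ((D.items.filter (fun p => f p.1 == f w)).map (·.2)).sum
      = ((D.keys.filter (fun u => f u == f w)).map (fun u => D.getD u 0)).sum := by
  rw [PySem.Dict.items_eq_map_keys D hnd 0, List.filter_map, List.map_map]
  rfl

theorem pv_main (D : PySem.Dict String Int) (f : String → String) (hnd : D.keys.Nodup) :
    (D.keys.foldl (fun cur w => cur.insert w
        ((D.keys.foldl (fun sv word =>
            if sv.contains (f word) then sv.insert (f word) (sv.getD (f word) 0 + D.getD word 0)
            else sv.insert (f word) (D.getD word 0)) PySem.Dict.empty).getD (f w) 0)) D).items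
    = ((D.keys.map (fun w =>
          (w, ((D.items.filter (fun p => f p.1 == f w)).map (·.2)).sum))).foldl
        (fun (c : PySem.Dict String Int) p => c.insert p.1 p.2) D).items := by
  set l := D.keys with hl
  set h : String → Int := fun w => ((l.filter (fun u => f u == f w)).map (fun u => D.getD u 0)).sum with hh
  have hcont : ∀ w ∈ l, D.contains w := fun w hw => (PySem.Dict.contains_iff_mem_keys D w).mpr hw
  -- A side
  have hA : (l.foldl (fun cur w => cur.insert w
        ((l.foldl (fun sv word =>
            if sv.contains (f word) then sv.insert (f word) (sv.getD (f word) 0 + D.getD word 0)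
            else sv.insert (f word) (D.getD word 0)) PySem.Dict.empty).getD (f w) 0)) D)
      = l.foldl (fun cur w => cur.insert w (h w)) D := by
    apply PySem.List.foldl_congr_mem
    intro cur w _
    rw [pv_accum_getD l f (fun u => D.getD u 0) PySem.Dict.empty (f w)]
    simp [hh]
  -- B side
  have hB : ((l.map (fun w =>
          (w, ((D.items.filter (fun p => f p.1 == f w)).map (·.2)).sum))).foldl
        (fun (c : PySem.Dict String Int) p => c.insert p.1 p.2) D)
      = l.foldl (fun cur w => cur.insert w (h w)) D := by
    rw [List.foldl_map]
    apply PySem.List.foldl_congr_mem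
    intro cur w _
    rw [pv_sums_agree D f hnd w]
  rw [hA, hB]

-- ===== VERDICT (by name: the statement is the Claim_ definition above) =====
theorem morphology_spec : Claim_equal_morphology := by
  intro dict stems _ hpre
  show morphology dict stems = morphology_alt dict stems
  unfold morphology morphology_alt
  have hnd : (PySem.Dict.mk dict).keys.Nodup := by
    simpa [PySem.Dict.keys_mk] using hpre.1
  exact pv_main (PySem.Dict.mk dict) (fun w => (PySem.Dict.mk stems).getD w "") hnd
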